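-- pv_equiv track=rewrite | github.com/prajwalkumar2343/aurabot | python/src/api/cors.py | is_allowed_origin
-- ===== SOURCE A (Python) =====
-- ALLOWED_ORIGINS = [
--     "http://localhost:3000",
--     "http://localhost:8080",
--     "http://localhost:7345",
--     "chrome-extension://*",
--     "https://chat.openai.com",
--     "https://chatgpt.com",
--     "https://claude.ai",
--     "https://gemini.google.com",
--     "https://perplexity.ai",
-- ]
--
-- def is_allowed_origin(origin: str) -> bool:
--     """Check if the origin is allowed."""
--     if not origin:
--         return True
--     for allowed in ALLOWED_ORIGINS:
--         if allowed.endswith("/*"):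
--             prefix = allowed[:-1]
--             if origin.startswith(prefix):
--                 return True
--         elif origin == allowed:
--             return True
--     return False
-- ===== SOURCE B (Python) =====
-- # Different algorithm: instead of scanning the allowed-origins list, parse the origin
-- # into scheme://host once and dispatch on the scheme (wildcard scheme accepts any host,
-- # the two web schemes accept a fixed host set, anything else is rejected).
-- EXACT_HOSTS_BY_SCHEME = {
--     "http": {"localhost:3000", "localhost:8080", "localhost:7345"},
--     "https": {"chat.openai.com", "chatgpt.com", "claude.ai",
--               "gemini.google.com", "perplexity.ai"},
-- }
--
-- def is_allowed_origin(origin: str) -> bool: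
--     """Check if the origin is allowed."""
--     if not origin:
--         return True
--     scheme, sep, host = origin.partition("://")
--     if not sep:
--         return False
--     if scheme == "chrome-extension":
--         return True
--     return host in EXACT_HOSTS_BY_SCHEME.get(scheme, ())
-- ===== Notes on version B (the rewrite author's own statement) =====
-- stated objective: alternative
-- what changed: Replaces A's scan over ALLOWED_ORIGINS (classifying each entry as wildcard or exact and matching against it) by a parse-then-dispatch algorithm: the origin is split once into scheme://host with str.partition and the scheme is dispatched (wildcard scheme accepts any host, http/https accept a fixed host set, others are rejected), so the allowed list is never iterated.
import Mathlib
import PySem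

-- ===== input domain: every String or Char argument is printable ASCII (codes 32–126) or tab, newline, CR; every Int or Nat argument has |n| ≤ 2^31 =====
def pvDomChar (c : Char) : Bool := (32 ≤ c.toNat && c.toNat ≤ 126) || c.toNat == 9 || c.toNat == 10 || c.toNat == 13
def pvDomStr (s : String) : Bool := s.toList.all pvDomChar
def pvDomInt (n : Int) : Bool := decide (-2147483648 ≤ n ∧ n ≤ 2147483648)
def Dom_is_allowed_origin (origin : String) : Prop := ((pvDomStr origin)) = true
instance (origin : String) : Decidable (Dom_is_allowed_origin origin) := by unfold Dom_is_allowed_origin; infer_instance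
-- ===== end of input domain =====

-- B replaces A's scan over ALLOWED_ORIGINS by a parse-then-dispatch algorithm: the origin is
-- split once into scheme://host and the scheme is dispatched (alternative decomposition, same cost).


-- ===== PORT A =====
def pvAllowedOriginsA : List String := [
  "http://localhost:3000",
  "http://localhost:8080",
  "http://localhost:7345",
  "chrome-extension://*",
  "https://chat.openai.com",
  "https://chatgpt.com",
  "https://claude.ai",
  "https://gemini.google.com",
  "https://perplexity.ai"]

-- the 'for allowed in ALLOWED_ORIGINS' loop with its early returns
def pvLoopA (origin : String) : List String → Bool
  | [] => false
  | allowed :: rest =>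
    if PySem.Str.endswith allowed "/*" then
      let pre := PySem.Str.slice allowed none (some (-1))
      if PySem.Str.startswith origin pre then true else pvLoopA origin rest
    else if origin == allowed then true else pvLoopA origin rest

def is_allowed_origin (origin : String) : Bool :=
  if origin == "" then true
  else pvLoopA origin pvAllowedOriginsA

-- ===== PORT B =====
-- the separator "://" as characters
def pvSepB : List Char := [':', '/', '/']

def pvChromeB : List Char := "chrome-extension".toList

def pvHttpHostsB : List (List Char) :=
  ["localhost:3000".toList, "localhost:8080".toList, "localhost:7345".toList]

def pvHttpsHostsB : List (List Char) :=
  ["chat.openai.com".toList, "chatgpt.com".toList, "claude.ai".toList,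
   "gemini.google.com".toList, "perplexity.ai".toList]

-- EXACT_HOSTS_BY_SCHEME.get(scheme, ()): the two-key dict literal ported as a first-match
-- key chain (exact: the keys are distinct, default is the empty collection)
def pvHostsFor (scheme : List Char) : List (List Char) :=
  if scheme = "http".toList then pvHttpHostsB
  else if scheme = "https".toList then pvHttpsHostsB
  else []

-- s.partition(sub): split at the FIRST occurrence of sub, (s, '', '') if absent — exact
-- port of CPython str.partition via PySem.Chars.find (first occurrence, -1 if absent)
def pvPartitionB (s sub : List Char) : List Char × List Char × List Char :=
  let i := PySem.Chars.find s sub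
  if i = -1 then (s, [], [])
  else (s.take i.toNat, sub, s.drop (i.toNat + sub.length))

def is_allowed_origin_alt (origin : String) : Bool :=
  if origin == "" then true
  else
    let p := pvPartitionB origin.toList pvSepB
    if p.2.1 = [] then false
    else if p.1 = pvChromeB then true
    else (pvHostsFor p.1).contains p.2.2

-- ===== PRECONDITION & SPEC =====
def Spec_is_allowed_origin (origin : String) (out : Bool) : Prop := out = is_allowed_origin_alt origin
instance (origin : String) (out : Bool) : Decidable (Spec_is_allowed_origin origin out) := by unfold Spec_is_allowed_origin; infer_instance

-- ===== CLAIM =====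
def Claim_equal_is_allowed_origin : Prop := ∀ (origin : String), Dom_is_allowed_origin origin → Spec_is_allowed_origin origin (is_allowed_origin origin)

-- ===== LEMMAS AND PROOFS =====

-- the common characterization: empty, wildcard prefix, or one of the eight exact origins
def pvGood (origin : String) : Prop :=
  origin = "" ∨ (pvChromeB ++ pvSepB) <+: origin.toList ∨
  origin = "http://localhost:3000" ∨ origin = "http://localhost:8080" ∨
  origin = "http://localhost:7345" ∨ origin = "https://chat.openai.com" ∨
  origin = "https://chatgpt.com" ∨ origin = "https://claude.ai" ∨
  origin = "https://gemini.google.com" ∨ origin = "https://perplexity.ai"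

set_option maxRecDepth 8000 in
theorem A_iff (origin : String) : is_allowed_origin origin = true ↔ pvGood origin := by
  have e1 : PySem.Str.endswith "http://localhost:3000" "/*" = false := by decide
  have e2 : PySem.Str.endswith "http://localhost:8080" "/*" = false := by decide
  have e3 : PySem.Str.endswith "http://localhost:7345" "/*" = false := by decide
  have e4 : PySem.Str.endswith "chrome-extension://*" "/*" = true := by decide
  have e5 : PySem.Str.endswith "https://chat.openai.com" "/*" = false := by decide
  have e6 : PySem.Str.endswith "https://chatgpt.com" "/*" = false := by decide
  have e7 : PySem.Str.endswith "https://claude.ai" "/*" = false := by decide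
  have e8 : PySem.Str.endswith "https://gemini.google.com" "/*" = false := by decide
  have e9 : PySem.Str.endswith "https://perplexity.ai" "/*" = false := by decide
  have esl : PySem.Str.slice "chrome-extension://*" none (some (-1)) = "chrome-extension://" := by decide
  have hc : "chrome-extension://".toList = pvChromeB ++ pvSepB := by decide
  unfold is_allowed_origin pvGood
  by_cases h : origin = ""
  · subst h; simp
  · have hne : (origin == "") = false := by simp [h]
    have hA : pvLoopA origin pvAllowedOriginsA =
        (origin == "http://localhost:3000" || origin == "http://localhost:8080" ||
         origin == "http://localhost:7345" || PySem.Str.startswith origin "chrome-extension://" ||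
         origin == "https://chat.openai.com" || origin == "https://chatgpt.com" ||
         origin == "https://claude.ai" || origin == "https://gemini.google.com" ||
         origin == "https://perplexity.ai") := by
      simp only [pvAllowedOriginsA, pvLoopA, e1, e2, e3, e4, e5, e6, e7, e8, e9, esl,
        Bool.false_eq_true, if_false]
      split_ifs with h1 h2 h3 h4 h5 h6 h7 h8 h9 <;> simp_all
    simp only [hne, Bool.false_eq_true, if_false, hA, h, false_or, Bool.or_eq_true,
      beq_iff_eq, PySem.Str.startswith_eq, PySem.Chars.startswith_iff, hc]
    tauto

-- if the wildcard prefix starts the string, "://" first occurs at index 16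
theorem find_of_chrome_prefix (l : List Char) (h : (pvChromeB ++ pvSepB) <+: l) :
    PySem.Chars.find l pvSepB = 16 := by
  obtain ⟨r, hr⟩ := h
  have h16 : pvSepB <+: l.drop 16 := by
    refine ⟨r, ?_⟩
    rw [← hr, List.drop_append_of_le_length (by decide)]
    simp [pvChromeB, pvSepB]
  have hinfix : pvSepB <:+: l := by
    obtain ⟨t, ht⟩ := h16
    exact ⟨l.take 16, t, by rw [List.append_assoc, ht, List.take_append_drop]⟩
  have hne : PySem.Chars.find l pvSepB ≠ -1 := (PySem.Chars.find_ne_neg_one_iff l pvSepB).mpr hinfix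
  have hnegle := PySem.Chars.neg_one_le_find l pvSepB
  have hpos : 0 ≤ PySem.Chars.find l pvSepB := by omega
  obtain ⟨hp, hmin⟩ := PySem.Chars.find_spec hpos
  have hk16 : (PySem.Chars.find l pvSepB).toNat ≤ 16 := by
    by_contra hgt
    exact hmin 16 (by omega) h16
  have hkeq : (PySem.Chars.find l pvSepB).toNat = 16 := by
    set k := (PySem.Chars.find l pvSepB).toNat with hkdef
    by_contra hne2
    have hklt : k < 16 := by omega
    obtain ⟨t, ht⟩ := hp
    have hgk : l[k]? = some ':' := by
      have h0 : (l.drop k)[0]? = some ':' := by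
        rw [← ht]; simp [pvSepB]
      rwa [List.getElem?_drop, Nat.add_zero] at h0
    have hgk2 : (pvChromeB ++ pvSepB ++ r)[k]? = some ':' := by rw [hr]; exact hgk
    have h19 : k < (pvChromeB ++ pvSepB).length := by simp [pvChromeB, pvSepB]; omega
    rw [List.getElem?_append_left h19] at hgk2
    clear_value k
    interval_cases k <;> revert hgk2 <;> decide
  omega

theorem B_of_good (origin : String) (h : pvGood origin) : is_allowed_origin_alt origin = true := by
  rcases h with h | h | h | h | h | h | h | h | h | h
  · subst h; decide
  · have hf := find_of_chrome_prefix origin.toList h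
    obtain ⟨r, hr⟩ := h
    have hne : (origin == "") = false := by
      simp only [beq_eq_false_iff_ne, ne_eq]
      intro he
      have hlen : (pvChromeB ++ pvSepB ++ r).length = 0 := by rw [hr, he]; rfl
      simp [pvChromeB, pvSepB] at hlen
    have htake : origin.toList.take 16 = pvChromeB := by
      rw [← hr, List.take_append_of_le_length (by decide)]
      decide
    have hpart : pvPartitionB origin.toList pvSepB = (pvChromeB, pvSepB, origin.toList.drop 19) := by
      unfold pvPartitionB
      rw [hf]
      norm_num [pvSepB]
      exact ⟨by simpa using htake, by simp⟩
    simp only [is_allowed_origin_alt, hne, Bool.false_eq_true, if_false, hpart]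
    simp [pvSepB]
  all_goals subst h; decide

theorem good_of_B (origin : String) (h : is_allowed_origin_alt origin = true) : pvGood origin := by
  by_cases h0 : origin = ""
  · exact Or.inl h0
  have hne : (origin == "") = false := by simp [h0]
  unfold is_allowed_origin_alt pvPartitionB at h
  rw [hne] at h
  by_cases hf : PySem.Chars.find origin.toList pvSepB = -1
  · simp [hf] at h
  have hnegle := PySem.Chars.neg_one_le_find origin.toList pvSepB
  have hpos : 0 ≤ PySem.Chars.find origin.toList pvSepB := by omega
  obtain ⟨hp, hmin⟩ := PySem.Chars.find_spec hpos
  simp only [Bool.false_eq_true, if_false, if_neg hf] at h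
  set k := (PySem.Chars.find origin.toList pvSepB).toNat with hkdef
  -- reconstruction: the string is  take k ++ "://" ++ drop (k+3)
  obtain ⟨t, ht⟩ := hp
  have hdrop3 : origin.toList.drop (k + 3) = t := by
    rw [← List.drop_drop, ← ht]
    rfl
  have hrecon : origin.toList = origin.toList.take k ++ pvSepB ++ origin.toList.drop (k + 3) := by
    have htd := List.take_append_drop k origin.toList
    rw [← ht] at htd
    rw [hdrop3, List.append_assoc]
    exact htd.symm
  simp only [pvSepB, reduceCtorEq, if_false] at h
  split_ifs at h with hch
  · -- chrome scheme: the wildcard prefix starts the string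
    refine Or.inr (Or.inl ⟨origin.toList.drop (k + 3), ?_⟩)
    rw [List.append_assoc] at hrecon ⊢
    rw [← hch]
    exact hrecon.symm
  · -- exact host table
    unfold pvHostsFor at h
    split_ifs at h with hh1 hh2
    · have hm : origin.toList.drop (k + 3) ∈ pvHttpHostsB := by simpa using h
      simp only [pvHttpHostsB, List.mem_cons, List.not_mem_nil, or_false] at hm
      rcases hm with hm | hm | hm <;>
        [refine Or.inr (Or.inr (Or.inl ?_));
         refine Or.inr (Or.inr (Or.inr (Or.inl ?_)));
         refine Or.inr (Or.inr (Or.inr (Or.inr (Or.inl ?_))))] <;>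
        · rw [← String.toList_inj, hrecon, hh1, hm]; decide
    · have hm : origin.toList.drop (k + 3) ∈ pvHttpsHostsB := by simpa using h
      simp only [pvHttpsHostsB, List.mem_cons, List.not_mem_nil, or_false] at hm
      rcases hm with hm | hm | hm | hm | hm
      · refine Or.inr (Or.inr (Or.inr (Or.inr (Or.inr (Or.inl ?_)))))
        rw [← String.toList_inj, hrecon, hh2, hm]; decide
      · refine Or.inr (Or.inr (Or.inr (Or.inr (Or.inr (Or.inr (Or.inl ?_))))))
        rw [← String.toList_inj, hrecon, hh2, hm]; decide
      · refine Or.inr (Or.inr (Or.inr (Or.inr (Or.inr (Or.inr (Or.inr (Or.inl ?_)))))))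
        rw [← String.toList_inj, hrecon, hh2, hm]; decide
      · refine Or.inr (Or.inr (Or.inr (Or.inr (Or.inr (Or.inr (Or.inr (Or.inr (Or.inl ?_))))))))
        rw [← String.toList_inj, hrecon, hh2, hm]; decide
      · refine Or.inr (Or.inr (Or.inr (Or.inr (Or.inr (Or.inr (Or.inr (Or.inr (Or.inr ?_))))))))
        rw [← String.toList_inj, hrecon, hh2, hm]; decide
    · simp at h

-- ===== VERDICT =====
theorem is_allowed_origin_spec : Claim_equal_is_allowed_origin := by
  intro origin _
  unfold Spec_is_allowed_origin
  cases hA : is_allowed_origin origin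
  · cases hB : is_allowed_origin_alt origin
    · rfl
    · exact absurd ((A_iff origin).mpr (good_of_B origin hB)) (by simp [hA])
  · exact (B_of_good origin ((A_iff origin).mp hA)).symm
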